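-- pv_equiv track=rewrite | github.com/jenihuang/Coding_problems | Codewars/scramblies_dict.py | scramblies
-- ===== SOURCE A (Python) =====
-- def scramblies(str1, str2):
--     str1_count = {}
--
--     for letter in str1:
--         if letter in str1_count:
--             str1_count[letter] += 1
--         else:
--             str1_count[letter] = 1
--
--     for letter in str2:
--         if letter in str1_count and str1_count[letter] > 0:
--             str1_count[letter] -= 1
--         else:
--             return False
--     return True
-- ===== SOURCE B (Python) =====
-- def scramblies(str1, str2):
--     return all(str1.count(c) >= str2.count(c) for c in set(str2))
-- ===== Notes on version B (the rewrite author's own statement) =====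
-- stated objective: simpler
-- what changed: Replaces the dict-building pass plus the mutating decrement-scan with early return by a single comprehension comparing per-distinct-character counts of the two strings.
import Mathlib
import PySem

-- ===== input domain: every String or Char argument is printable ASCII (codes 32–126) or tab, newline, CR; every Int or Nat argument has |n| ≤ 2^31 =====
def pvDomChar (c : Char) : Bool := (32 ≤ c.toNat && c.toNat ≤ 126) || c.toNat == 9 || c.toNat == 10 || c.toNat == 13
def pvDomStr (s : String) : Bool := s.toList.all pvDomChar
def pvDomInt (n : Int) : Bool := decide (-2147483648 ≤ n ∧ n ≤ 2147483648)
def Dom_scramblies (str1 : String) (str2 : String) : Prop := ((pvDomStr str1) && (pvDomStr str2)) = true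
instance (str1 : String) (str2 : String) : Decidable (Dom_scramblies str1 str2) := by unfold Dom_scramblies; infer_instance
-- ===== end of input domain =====

-- B replaces A's dict-building pass and mutating decrement-scan (with early return) by a single
-- all-quantified comparison of per-distinct-character counts (objective: simpler).


-- ===== PORT A =====
-- A's second loop: scan str2, decrementing the count dict, early return False
-- (inside the taken branch 'd.contains c' holds, so 'd.getD c 0' is exactly Python's d[c])
def scrambliesLoop (d : PySem.Dict Char Int) : List Char → Bool
  | [] => true
  | c :: rest =>
      if d.contains c && decide (0 < d.getD c 0)
      then scrambliesLoop (d.insert c (d.getD c 0 - 1)) rest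
      else false

def scramblies (str1 : String) (str2 : String) : Bool :=
  let str1Count := str1.toList.foldl
    (fun d letter =>
      if d.contains letter then d.insert letter (d.getD letter 0 + 1)
      else d.insert letter (1 : Int))
    PySem.Dict.empty
  scrambliesLoop str1Count str2.toList

-- ===== PORT B =====
def scramblies_alt (str1 : String) (str2 : String) : Bool :=
  (PySem.Set.ofList str2.toList).all
    (fun c => PySem.Str.count str2 (String.ofList [c]) ≤ PySem.Str.count str1 (String.ofList [c]))

-- ===== PRECONDITION & SPEC =====
def Spec_scramblies (str1 : String) (str2 : String) (out : Bool) : Prop := out = scramblies_alt str1 str2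
instance (str1 : String) (str2 : String) (out : Bool) : Decidable (Spec_scramblies str1 str2 out) := by unfold Spec_scramblies; infer_instance

-- ===== CLAIM (what is proved, stated in full; the proofs are below) =====
def Claim_equal_scramblies : Prop := ∀ (str1 : String) (str2 : String), Dom_scramblies str1 str2 → Spec_scramblies str1 str2 (scramblies str1 str2)

-- ===== LEMMAS AND PROOFS =====

-- Python's s.count(sub) for a one-character sub is the plain character count
lemma go_single (c : Char) : ∀ (l : List Char) (fuel acc : Nat), l.length ≤ fuel →
    PySem.Chars.count.go [c] fuel l acc = acc + l.count c := by
  intro l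
  induction l with
  | nil =>
    intro fuel acc _
    cases fuel <;> simp [PySem.Chars.count.go]
  | cons h t ih =>
    intro fuel acc hle
    cases fuel with
    | zero => simp at hle
    | succ f =>
      have hunf : PySem.Chars.count.go [c] (f+1) (h::t) acc =
          if [c].isPrefixOf (h::t) then PySem.Chars.count.go [c] f ((h::t).drop 1) (acc+1)
          else PySem.Chars.count.go [c] f t acc := by
        rw [PySem.Chars.count.go]; rfl
      rw [hunf]
      have hpre : [c].isPrefixOf (h::t) = (c == h) := by
        simp [List.isPrefixOf]
      rw [hpre]
      by_cases hc : c = h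
      · rw [if_pos (by simp [hc]), List.drop_one, List.tail_cons,
          ih f (acc + 1) (by simpa using hle), List.count_cons]
        simp [hc]
        omega
      · rw [if_neg (by simp [hc]), ih f acc (by simpa using hle), List.count_cons]
        simp [Ne.symm hc]

lemma count_single (s : List Char) (c : Char) : PySem.Chars.count s [c] = s.count c := by
  simp [PySem.Chars.count, go_single c s s.length 0 le_rfl]

-- A's branchy counting fold step is the uniform insert-increment step (when absent, getD is 0)
lemma build_fn_eq :
    (fun (d : PySem.Dict Char Int) letter =>
      if d.contains letter then d.insert letter (d.getD letter 0 + 1)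
      else d.insert letter (1 : Int))
    = (fun (d : PySem.Dict Char Int) x => d.insert x (d.getD x 0 + 1)) := by
  funext d x
  by_cases h : d.contains x = true
  · simp [h]
  · rw [if_neg (by simpa using h),
      PySem.Dict.getD_of_not_contains d 0 (by simpa using h)]
    norm_num

-- A's scan loop succeeds iff the dict covers every remaining count (dict values nonnegative)
lemma scrambliesLoop_iff (l : List Char) : ∀ (d : PySem.Dict Char Int),
    (∀ c, 0 ≤ d.getD c 0) →
    (scrambliesLoop d l = true ↔ ∀ c, (l.count c : Int) ≤ d.getD c 0) := by
  induction l with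
  | nil =>
    intro d hnn
    simp [scrambliesLoop]
    intro c; exact hnn c
  | cons c rest ih =>
    intro d hnn
    by_cases hpos : 0 < d.getD c 0
    · have hcont : d.contains c = true := by
        cases h : d.contains c
        · rw [PySem.Dict.getD_of_not_contains d 0 h] at hpos; omega
        · rfl
      rw [scrambliesLoop, if_pos (by simp [hcont, hpos])]
      have hnn' : ∀ x, 0 ≤ (d.insert c (d.getD c 0 - 1)).getD x 0 := by
        intro x
        rw [PySem.Dict.getD_insert]
        split_ifs with hx
        · omega
        · exact hnn x
      rw [ih _ hnn']
      constructor
      · intro h x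
        have hx := h x
        rw [PySem.Dict.getD_insert] at hx
        rw [List.count_cons]
        by_cases hxc : x = c
        · subst hxc
          rw [if_pos rfl] at hx
          simp only [BEq.rfl, if_true]
          push_cast
          omega
        · rw [if_neg hxc] at hx
          rw [if_neg (by simp [Ne.symm hxc])]
          push_cast
          omega
      · intro h x
        have hx := h x
        rw [List.count_cons] at hx
        rw [PySem.Dict.getD_insert]
        by_cases hxc : x = c
        · subst hxc
          rw [if_pos rfl]
          simp only [BEq.rfl, if_true] at hx
          push_cast at hx
          omega
        · rw [if_neg hxc]
          rw [if_neg (by simp [Ne.symm hxc])] at hx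
          push_cast at hx
          omega
    · have hz : d.getD c 0 = 0 := le_antisymm (by omega) (hnn c)
      have hfalse : scrambliesLoop d (c :: rest) = false := by
        rw [scrambliesLoop, if_neg (by simp [hz])]
      rw [hfalse]
      refine iff_of_false (by simp) ?_
      intro h
      have hx := h c
      rw [List.count_cons, hz] at hx
      simp only [BEq.rfl, if_true] at hx
      push_cast at hx
      omega

-- A returns true iff every character's count in str2 is covered by str1
lemma scramblies_iff (str1 str2 : String) :
    scramblies str1 str2 = true ↔
      ∀ c, (str2.toList.count c : Int) ≤ (str1.toList.count c : Int) := by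
  have hrfl : scramblies str1 str2 = scrambliesLoop
      (str1.toList.foldl
        (fun d letter =>
          if d.contains letter then d.insert letter (d.getD letter 0 + 1)
          else d.insert letter (1 : Int))
        PySem.Dict.empty) str2.toList := rfl
  rw [hrfl, build_fn_eq]
  have hd : ∀ c, (str1.toList.foldl (fun d x => d.insert x (d.getD x 0 + 1))
      PySem.Dict.empty).getD c 0 = (str1.toList.count c : Int) := by
    intro c
    rw [PySem.Dict.getD_foldl_insert_add_one, PySem.Dict.getD_empty]
    omega
  rw [scrambliesLoop_iff _ _ (fun c => by rw [hd c]; positivity)]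
  exact forall_congr' fun c => by rw [hd c]

-- B returns true iff the same condition holds
lemma str_count_single (s : String) (c : Char) :
    PySem.Str.count s (String.ofList [c]) = s.toList.count c := by
  have ht : (String.ofList [c]).toList = [c] := by simp
  rw [PySem.Str.count, ht, count_single]

lemma scramblies_alt_iff (str1 str2 : String) :
    scramblies_alt str1 str2 = true ↔
      ∀ c, (str2.toList.count c : Int) ≤ (str1.toList.count c : Int) := by
  unfold scramblies_alt
  rw [List.all_eq_true]
  constructor
  · intro h c
    by_cases hc : c ∈ str2.toList
    · have hcc := h c (by simpa [PySem.Set.mem_ofList] using hc)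
      rw [str_count_single, str_count_single, decide_eq_true_eq] at hcc
      exact_mod_cast hcc
    · rw [List.count_eq_zero_of_not_mem hc]
      positivity
  · intro h c _
    have hcc := h c
    rw [str_count_single, str_count_single, decide_eq_true_eq]
    omega

-- ===== VERDICT (by name: the statement is the Claim_ definition above) =====
theorem scramblies_spec : Claim_equal_scramblies := by
  intro str1 str2 _
  unfold Spec_scramblies
  have h := (scramblies_iff str1 str2).trans (scramblies_alt_iff str1 str2).symm
  cases hA : scramblies str1 str2 <;> cases hB : scramblies_alt str1 str2 <;> simp_all
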